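-- pv_equiv track=rewrite | github.com/chrismmorin-ux/Perspective-Cosmology | verification/sympy/conj_a3_algebraic_incompatibility.py | radon_hurwitz
-- ===== SOURCE A (Python) =====
-- def radon_hurwitz(n):
--     """
--     Compute the Radon-Hurwitz number rho(n).
--
--     Write n = 2^(4a+b) * m where m is odd, 0 <= b <= 3.
--     Then rho(n) = 2^b + 8a.
--
--     This gives the maximum r such that a [r,n,n]-composition exists
--     (bilinear f: R^r x R^n -> R^n with |f(x,y)| = |x||y|).
--     """
--     if n <= 0:
--         return 0
--
--     # Factor out powers of 2
--     m = n
--     power_of_2 = 0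
--     while m % 2 == 0:
--         m //= 2
--         power_of_2 += 1
--
--     # power_of_2 = 4a + b, 0 <= b <= 3
--     a = power_of_2 // 4
--     b = power_of_2 % 4
--
--     return 2**b + 8*a
-- ===== SOURCE B (Python) =====
-- def radon_hurwitz(n):
--     """Radon-Hurwitz number rho(n), computed without a loop via the
--     lowest-set-bit trick: v2(n) = (n & -n).bit_length() - 1."""
--     if n <= 0:
--         return 0
--     v = (n & -n).bit_length() - 1
--     a, b = divmod(v, 4)
--     return 2 ** b + 8 * a
-- ===== Notes on version B (the rewrite author's own statement) =====
-- stated objective: idiomatic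
-- what changed: The while loop that strips factors of 2 is replaced by a closed-form bit manipulation: the 2-adic valuation is read off as (n & -n).bit_length() - 1, so no iteration remains.
import Mathlib
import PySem

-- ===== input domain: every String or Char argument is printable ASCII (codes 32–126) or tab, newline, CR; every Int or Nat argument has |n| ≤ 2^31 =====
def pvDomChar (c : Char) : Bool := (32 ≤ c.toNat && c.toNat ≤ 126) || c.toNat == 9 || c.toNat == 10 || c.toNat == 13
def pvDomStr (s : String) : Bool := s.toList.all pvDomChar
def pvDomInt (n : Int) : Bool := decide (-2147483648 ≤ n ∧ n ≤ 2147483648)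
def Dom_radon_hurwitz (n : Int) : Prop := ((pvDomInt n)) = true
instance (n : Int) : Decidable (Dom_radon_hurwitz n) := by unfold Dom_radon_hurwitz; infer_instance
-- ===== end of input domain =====

-- B replaces A's factor-stripping while loop by the closed-form lowest-set-bit trick
-- (n & -n).bit_length() - 1 for the 2-adic valuation (idiomatic, loop-free).


-- ===== PORT A =====
-- A's while loop `while m % 2 == 0: m //= 2; power_of_2 += 1`, with fuel
-- (the loop is only entered with m = n > 0, so n.toNat iterations always suffice).
def radonLoop : Nat → Int → Int → Int × Int
  | 0, m, p => (m, p)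
  | fuel + 1, m, p =>
      if PySem.Int.mod m 2 == 0 then radonLoop fuel (PySem.Int.floordiv m 2) (p + 1)
      else (m, p)

def radon_hurwitz (n : Int) : Int :=
  if n ≤ 0 then 0
  else
    let v := (radonLoop n.toNat n 0).2
    let a := PySem.Int.floordiv v 4
    let b := PySem.Int.mod v 4
    2 ^ b.toNat + 8 * a   -- 2**b with b = v % 4 ∈ {0,1,2,3}, so the Nat exponent is exact

-- ===== PORT B =====
def radon_hurwitz_alt (n : Int) : Int :=
  if n ≤ 0 then 0
  else
    -- v = (n & -n).bit_length() - 1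
    let v : Int := (PySem.Int.bitLength (PySem.Int.band n (-n)) : Int) - 1
    -- a, b = divmod(v, 4)
    let a := PySem.Int.floordiv v 4
    let b := PySem.Int.mod v 4
    2 ^ b.toNat + 8 * a

-- ===== PRECONDITION & SPEC =====
def Spec_radon_hurwitz (n : Int) (out : Int) : Prop := out = radon_hurwitz_alt n
instance (n : Int) (out : Int) : Decidable (Spec_radon_hurwitz n out) := by unfold Spec_radon_hurwitz; infer_instance

-- ===== CLAIM (what is proved, stated in full; the proofs are below) =====
def Claim_equal_radon_hurwitz : Prop := ∀ (n : Int), Dom_radon_hurwitz n → Spec_radon_hurwitz n (radon_hurwitz n)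

-- ===== LEMMAS AND PROOFS =====

-- 2-adic valuation of a natural number (0 on 0 and on odd numbers)
def v2 (k : Nat) : Nat :=
  if h : k % 2 = 0 ∧ 0 < k then v2 (k / 2) + 1 else 0
termination_by k
decreasing_by omega

theorem v2_even (k : Nat) (h : k % 2 = 0) (hk : 0 < k) : v2 k = v2 (k / 2) + 1 := by
  conv_lhs => rw [v2]
  rw [dif_pos ⟨h, hk⟩]

theorem v2_odd (k : Nat) (h : k % 2 = 1) : v2 k = 0 := by
  rw [v2, dif_neg (by omega)]

theorem and_succ_odd (j : Nat) : (2 * j + 1) &&& (2 * j) = 2 * j := by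
  apply Nat.eq_of_testBit_eq
  intro i
  cases i with
  | zero =>
      have h1 : (2 * j + 1) % 2 = 1 := by omega
      have h2 : (2 * j) % 2 = 0 := by omega
      simp [Nat.testBit_zero, h1, h2]
  | succ i =>
      have d1 : (2 * j + 1) / 2 = j := by omega
      have d2 : (2 * j) / 2 = j := by omega
      rw [Nat.testBit_and]
      simp only [Nat.testBit_add_one, d1, d2]
      exact Bool.and_self _

theorem and_pred_even (j : Nat) (hj : 0 < j) :
    (2 * j) &&& (2 * j - 1) = 2 * (j &&& (j - 1)) := by
  apply Nat.eq_of_testBit_eq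
  intro i
  cases i with
  | zero =>
      have h1 : (2 * j) % 2 = 0 := by omega
      have h2 : (2 * (j &&& (j - 1))) % 2 = 0 := by omega
      simp [Nat.testBit_zero, h1, h2]
  | succ i =>
      have d1 : (2 * j) / 2 = j := by omega
      have d2 : (2 * j - 1) / 2 = j - 1 := by omega
      have d3 : (2 * (j &&& (j - 1))) / 2 = j &&& (j - 1) := by omega
      rw [Nat.testBit_and]
      simp only [Nat.testBit_add_one, d1, d2, d3]
      rw [Nat.testBit_and]

theorem sub_and_eq_pow : ∀ k : Nat, 0 < k → k - (k &&& (k - 1)) = 2 ^ v2 k := by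
  intro k
  induction k using Nat.strong_induction_on with
  | _ k ih =>
    intro hk
    by_cases hpar : k % 2 = 0
    · obtain ⟨j, rfl⟩ : ∃ j, k = 2 * j := ⟨k / 2, by omega⟩
      have hj : 0 < j := by omega
      have hand : (2 * j) &&& (2 * j - 1) = 2 * (j &&& (j - 1)) := and_pred_even j hj
      have hle : j &&& (j - 1) ≤ j := Nat.and_le_left
      have hih := ih j (by omega) hj
      have hdiv : 2 * j / 2 = j := by omega
      rw [hand, v2_even (2 * j) hpar hk, hdiv, pow_succ]
      omega
    · obtain ⟨j, rfl⟩ : ∃ j, k = 2 * j + 1 := ⟨k / 2, by omega⟩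
      have hp1 : (2 * j + 1) % 2 = 1 := by omega
      have hand : (2 * j + 1) &&& (2 * j + 1 - 1) = 2 * j := by
        rw [Nat.add_sub_cancel]
        exact and_succ_odd j
      rw [hand, v2_odd (2 * j + 1) hp1]
      omega

theorem radonLoop_snd : ∀ (f k : Nat) (p : Int), 0 < k → k ≤ f →
    (radonLoop f (↑k) p).2 = p + (v2 k : Int) := by
  intro f
  induction f with
  | zero => intro k p h1 h2; omega
  | succ f ih =>
    intro k p h1 h2
    have hm : PySem.Int.mod (↑k) 2 = ((k % 2 : Nat) : Int) := by
      exact_mod_cast PySem.Int.mod_natCast k 2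
    have hd : PySem.Int.floordiv (↑k) 2 = ((k / 2 : Nat) : Int) := by
      exact_mod_cast PySem.Int.floordiv_natCast k 2
    by_cases hpar : k % 2 = 0
    · have hcond : (PySem.Int.mod (↑k) 2 == 0) = true := by
        rw [hm, hpar]; simp
      simp only [radonLoop, hcond, if_true, hd]
      rw [ih (k / 2) (p + 1) (by omega) (by omega), v2_even k hpar h1]
      push_cast
      ring
    · have hp1 : k % 2 = 1 := by omega
      have hcond : (PySem.Int.mod (↑k) 2 == 0) = false := by
        rw [hm, hp1]; simp
      simp only [radonLoop, hcond]
      rw [v2_odd k hp1]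
      simp

theorem band_neg_self (k : Nat) (hk : 0 < k) :
    PySem.Int.band (↑k) (-↑k) = ((2 ^ v2 k : Nat) : Int) := by
  have h0 : (0 : Int) ≤ ↑k := by omega
  have h1 : ¬ (0 ≤ -(k : Int)) := by omega
  simp only [PySem.Int.band]
  rw [if_pos h0, if_neg h1]
  have e1 : ((k : Int)).toNat = k := by omega
  have e2 : (-(-(k : Int)) - 1).toNat = k - 1 := by omega
  rw [e1, e2, sub_and_eq_pow k hk]

theorem bitLength_two_pow (v : Nat) : PySem.Int.bitLength ((2 ^ v : Nat) : Int) = v + 1 := by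
  induction v with
  | zero =>
      have h := PySem.Int.bitLength_natCast (m := 1) (by omega)
      norm_num at h ⊢
      simpa [PySem.Int.bitLength_zero] using h
  | succ v ih =>
      rw [PySem.Int.bitLength_natCast (by positivity)]
      have h2 : 2 ^ (v + 1) / 2 = 2 ^ v := by
        rw [pow_succ]; omega
      rw [h2, ih]

-- ===== VERDICT (by name: the statement is the Claim_ definition above) =====
theorem radon_hurwitz_spec : Claim_equal_radon_hurwitz := by
  unfold Claim_equal_radon_hurwitz Spec_radon_hurwitz
  intro n _
  by_cases hn : n ≤ 0
  · simp [radon_hurwitz, radon_hurwitz_alt, hn]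
  · obtain ⟨k, rfl⟩ : ∃ k : Nat, n = ↑k := ⟨n.toNat, by omega⟩
    have hkpos : 0 < k := by omega
    have hA : (radonLoop ((k : Int)).toNat (↑k) 0).2 = (v2 k : Int) := by
      rw [Int.toNat_natCast]
      rw [radonLoop_snd k k 0 hkpos le_rfl]
      ring
    have hB : ((PySem.Int.bitLength (PySem.Int.band (↑k) (-↑k)) : Nat) : Int) - 1
        = (v2 k : Int) := by
      rw [band_neg_self k hkpos, bitLength_two_pow]
      push_cast
      ring
    simp only [radon_hurwitz, radon_hurwitz_alt, if_neg hn]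
    rw [hA, hB]
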